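-- pv_equiv track=rewrite | github.com/aram-devdocs/ThroneGame | python/dependency_map.py | categorize_dependencies
-- ===== SOURCE A (Python) =====
-- def categorize_dependencies(dependencies):
--     categorized_deps = {
--         "ThroneGame": set(),
--         "ThirdParty": set()
--     }
--     for deps in dependencies.values():
--         for dep in deps:
--             if dep.startswith("ThroneGame"):
--                 categorized_deps["ThroneGame"].add(dep)
--             else:
--                 categorized_deps["ThirdParty"].add(dep)
--     return categorized_deps
-- ===== SOURCE B (Python) =====
-- def categorize_dependencies(dependencies):
--     def go(items):
--         if not items:
--             return set(), set()
--         if len(items) == 1: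
--             deps = items[0][1]
--             t = {d for d in deps if d.startswith("ThroneGame")}
--             return t, set(deps) - t
--         mid = len(items) // 2
--         lt, lo = go(items[:mid])
--         rt, ro = go(items[mid:])
--         return lt | rt, lo | ro
--     throne, third = go(list(dependencies.items()))
--     return {"ThroneGame": throne, "ThirdParty": third}
-- ===== Notes on version B (the rewrite author's own statement) =====
-- stated objective: alternative
-- what changed: B replaces A's single nested loop that routes each dependency one by one with a divide-and-conquer recursion over the dict items: each single value-list is partitioned at once by a prefix comprehension plus set difference, and the two halves' results are merged by set union.
import Mathlib
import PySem

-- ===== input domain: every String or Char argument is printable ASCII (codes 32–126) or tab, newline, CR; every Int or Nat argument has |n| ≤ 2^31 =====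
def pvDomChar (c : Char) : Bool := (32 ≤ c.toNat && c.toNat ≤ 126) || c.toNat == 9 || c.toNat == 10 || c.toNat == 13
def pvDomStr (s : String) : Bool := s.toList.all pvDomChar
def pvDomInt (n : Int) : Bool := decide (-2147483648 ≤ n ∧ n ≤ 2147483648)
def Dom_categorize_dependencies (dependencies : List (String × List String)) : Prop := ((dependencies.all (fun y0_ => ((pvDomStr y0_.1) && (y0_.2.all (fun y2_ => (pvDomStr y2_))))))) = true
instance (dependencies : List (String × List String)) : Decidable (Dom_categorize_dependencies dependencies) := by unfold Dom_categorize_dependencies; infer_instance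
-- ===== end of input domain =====

-- B replaces A's per-element two-way routing loop by a tail recursion over the items that
-- partitions each value-list at once (prefix filter + set difference) and unions the parts
-- into the accumulators (objective: alternative decomposition, same cost).


-- ===== PORT A =====
-- Nested loop: each dep is routed into the "ThroneGame" or "ThirdParty" set as it is seen.
def categorize_dependencies (dependencies : List (String × List String)) : List (String × List String) :=
  let st := dependencies.foldl
    (fun (st : PySem.Set String × PySem.Set String) kv =>
      kv.2.foldl
        (fun st dep =>
          if PySem.Str.startswith dep "ThroneGame" then (PySem.Set.add st.1 dep, st.2)
          else (st.1, PySem.Set.add st.2 dep)) st)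
    (PySem.Set.empty, PySem.Set.empty)
  [("ThroneGame", st.1), ("ThirdParty", st.2)]

-- ===== PORT B =====
-- Divide and conquer over the items: a single value-list is partitioned at once (prefix
-- comprehension, set difference); two halves are solved recursively and merged by set union.
-- items[:mid] / items[mid:] with 0 ≤ mid ≤ len are exactly List.take / List.drop.
def pvGo (l : List (String × List String)) : PySem.Set String × PySem.Set String :=
  match l with
  | [] => (PySem.Set.empty, PySem.Set.empty)
  | [kv] =>
      let t := PySem.Set.ofList (kv.2.filter (fun d => PySem.Str.startswith d "ThroneGame"))
      (t, PySem.Set.diff (PySem.Set.ofList kv.2) t)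
  | a :: b :: rest =>
      let xs := a :: b :: rest
      let mid := xs.length / 2
      let left := pvGo (xs.take mid)
      let right := pvGo (xs.drop mid)
      (PySem.Set.union left.1 right.1, PySem.Set.union left.2 right.2)
termination_by l.length
decreasing_by
  · simpa [List.length_take] using by omega
  · simpa [List.length_drop] using by omega

def categorize_dependencies_alt (dependencies : List (String × List String)) : List (String × List String) :=
  let st := pvGo dependencies
  [("ThroneGame", st.1), ("ThirdParty", st.2)]

-- ===== PRECONDITION & SPEC =====
def Spec_categorize_dependencies (dependencies : List (String × List String)) (out : List (String × List String)) : Prop := out = categorize_dependencies_alt dependencies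
instance (dependencies : List (String × List String)) (out : List (String × List String)) : Decidable (Spec_categorize_dependencies dependencies out) := by unfold Spec_categorize_dependencies; infer_instance

-- ===== CLAIM (what is proved, stated in full; the proofs are below) =====
def Claim_equal_categorize_dependencies : Prop := ∀ (dependencies : List (String × List String)), Dom_categorize_dependencies dependencies → Spec_categorize_dependencies dependencies (categorize_dependencies dependencies)

-- ===== LEMMAS AND PROOFS =====

-- A's inner routing loop updates each accumulator with the matching filter of the chunk.
theorem pv_route (p : String → Bool) (deps : List String) (t o : PySem.Set String) :
    deps.foldl
      (fun (st : PySem.Set String × PySem.Set String) dep =>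
        if p dep then (PySem.Set.add st.1 dep, st.2) else (st.1, PySem.Set.add st.2 dep))
      (t, o)
    = (PySem.Set.update t (deps.filter p), PySem.Set.update o (deps.filter (fun d => !p d))) := by
  induction deps generalizing t o with
  | nil => simp [PySem.Set.update]
  | cons d deps ih =>
    by_cases hd : p d = true
    · simp [hd, ih, PySem.Set.update_cons]
    · have hd' : p d = false := by revert hd; cases p d <;> simp
      simp [hd', ih, PySem.Set.update_cons]

-- Unioning with set(xs) is the same as updating with xs.
theorem pv_union_ofList (t : PySem.Set String) (xs : List String) :
    PySem.Set.union t (PySem.Set.ofList xs) = PySem.Set.update t xs := by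
  simp [PySem.Set.union, PySem.Set.update_eq_append_filter, PySem.Set.ofList_ofList]

-- set filter commutes with dedup (first occurrences).
theorem pv_filter_ofList (p : String → Bool) (xs : List String) :
    (PySem.Set.ofList xs).filter p = PySem.Set.ofList (xs.filter p) := by
  induction xs with
  | nil => simp [PySem.Set.ofList_nil]
  | cons x xs ih =>
    by_cases hx : p x = true
    · simp [hx, PySem.Set.ofList_cons, PySem.Set.discard, ← ih, List.filter_filter,
        Bool.and_comm]
    · have hx' : p x = false := by revert hx; cases p x <;> simp
      have hcong : ∀ a ∈ PySem.Set.ofList xs, (p a && !(a == x)) = p a := by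
        intro a _
        by_cases h : a = x
        · subst h; simp [hx']
        · simp [h]
      simp [hx', PySem.Set.ofList_cons, PySem.Set.discard, List.filter_filter,
        List.filter_congr hcong, ih]

-- The chunk minus its p-part is the set of its ¬p-part.
theorem pv_diff_chunk (p : String → Bool) (deps : List String) :
    PySem.Set.diff (PySem.Set.ofList deps) (PySem.Set.ofList (deps.filter p))
      = PySem.Set.ofList (deps.filter (fun d => !p d)) := by
  rw [← pv_filter_ofList (fun d => !p d) deps]
  simp only [PySem.Set.diff]
  apply List.filter_congr
  intro x hx
  have hx' : x ∈ deps := (PySem.Set.mem_ofList _ _).mp hx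
  by_cases hp : p x = true
  · simp [PySem.Set.mem_ofList, List.mem_filter, hp, hx']
  · have hp' : p x = false := by revert hp; cases p x <;> simp
    simp [PySem.Set.mem_ofList, List.mem_filter, hp']

-- A's whole double loop, from any accumulators, updates them with the filters of the flattened deps.
theorem pv_outer (p : String → Bool) (l : List (String × List String)) (t o : PySem.Set String) :
    l.foldl
      (fun (st : PySem.Set String × PySem.Set String) kv =>
        kv.2.foldl
          (fun st dep =>
            if p dep then (PySem.Set.add st.1 dep, st.2) else (st.1, PySem.Set.add st.2 dep)) st)
      (t, o)
    = (PySem.Set.update t ((l.flatMap (fun kv => kv.2)).filter p),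
       PySem.Set.update o ((l.flatMap (fun kv => kv.2)).filter (fun d => !p d))) := by
  induction l generalizing t o with
  | nil => simp [PySem.Set.update]
  | cons kv l ih =>
    rw [List.foldl_cons, pv_route, ih]
    simp [List.filter_append, PySem.Set.update_append]

-- Union of two sets-of-lists is the set of the concatenation.
theorem pv_union_ofList_ofList (xs ys : List String) :
    PySem.Set.union (PySem.Set.ofList xs) (PySem.Set.ofList ys)
      = PySem.Set.ofList (xs ++ ys) := by
  rw [pv_union_ofList, PySem.Set.ofList_append]

-- B's divide-and-conquer returns the two filters of the flattened deps, as sets.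
theorem pv_go_spec (l : List (String × List String)) :
    pvGo l
    = (PySem.Set.ofList ((l.flatMap (fun kv => kv.2)).filter (fun d => PySem.Str.startswith d "ThroneGame")),
       PySem.Set.ofList ((l.flatMap (fun kv => kv.2)).filter (fun d => !PySem.Str.startswith d "ThroneGame"))) := by
  induction l using pvGo.induct with
  | case1 => simp [pvGo, PySem.Set.empty, PySem.Set.ofList_nil]
  | case2 kv =>
    rw [pvGo, pv_diff_chunk]
    simp
  | case3 a b rest xs mid ihT ihD =>
    rw [pvGo]
    simp only [show xs = a :: b :: rest from rfl, show mid = (a :: b :: rest).length / 2 from rfl]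
      at ihT ihD
    simp only [ihT, ihD, pv_union_ofList_ofList, ← List.filter_append, ← List.flatMap_append,
      List.take_append_drop]

-- ===== VERDICT (by name: the statement is the Claim_ definition above) =====
theorem categorize_dependencies_spec : Claim_equal_categorize_dependencies := by
  intro dependencies _
  unfold Spec_categorize_dependencies categorize_dependencies categorize_dependencies_alt
  rw [pv_outer, pv_go_spec]
  simp [PySem.Set.empty, PySem.Set.update_nil_left]
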